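-- pv_equiv track=rewrite | github.com/hu3mann/ChatRipperXX_DOPEMUX | src/chatx/privacy/hierarchical_context.py | _abstract_relationship_dynamics
-- ===== SOURCE A (Python) =====
-- from typing import Any, Dict, List, Optional, Set, Tuple, Union
--
-- def _abstract_relationship_dynamics(coarse_labels: List[str], fine_labels: List[str]) -> str:
--     """Abstract relationship dynamics from labels."""
--     # Focus on relationship-relevant coarse labels for safety
--     relationship_indicators = [
--         label for label in coarse_labels
--         if any(keyword in label for keyword in ["trust", "intimacy", "conflict", "support"])
--     ]
--
--     if "trust_building" in coarse_labels:
--         return "trust_development_dynamic"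
--     elif "conflict_resolution" in coarse_labels:
--         return "conflict_resolution_dynamic"
--     elif "intimacy_deepening" in coarse_labels:
--         return "intimacy_progression_dynamic"
--     elif "support_seeking" in coarse_labels:
--         return "support_exchange_dynamic"
--     elif len(relationship_indicators) > 2:
--         return "complex_relationship_dynamic"
--     else:
--         return "neutral_relationship_dynamic"
-- ===== SOURCE B (Python) =====
-- from typing import List
--
-- _RESULTS = ["trust_development_dynamic", "conflict_resolution_dynamic",
--             "intimacy_progression_dynamic", "support_exchange_dynamic"]
-- _PRIORITY = {"trust_building": 0, "conflict_resolution": 1,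
--              "intimacy_deepening": 2, "support_seeking": 3}
-- _KEYWORDS = ["trust", "intimacy", "conflict", "support"]
--
-- def _abstract_relationship_dynamics(coarse_labels: List[str], fine_labels: List[str]) -> str:
--     # Single pass: track the highest-priority trigger seen and the keyword-indicator count.
--     best = 4
--     count = 0
--     for label in coarse_labels:
--         p = _PRIORITY.get(label, 4)
--         if p < best:
--             best = p
--         if any(k in label for k in _KEYWORDS):
--             count += 1
--     if best < 4:
--         return _RESULTS[best]
--     return "complex_relationship_dynamic" if count > 2 else "neutral_relationship_dynamic"
-- ===== Notes on version B (the rewrite author's own statement) =====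
-- stated objective: alternative
-- what changed: Replaces A's four separate membership scans plus an indicator-list comprehension by a single pass over coarse_labels maintaining two accumulators (the minimum trigger priority seen and the keyword-indicator count), then decides from those accumulators.
import Mathlib
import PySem

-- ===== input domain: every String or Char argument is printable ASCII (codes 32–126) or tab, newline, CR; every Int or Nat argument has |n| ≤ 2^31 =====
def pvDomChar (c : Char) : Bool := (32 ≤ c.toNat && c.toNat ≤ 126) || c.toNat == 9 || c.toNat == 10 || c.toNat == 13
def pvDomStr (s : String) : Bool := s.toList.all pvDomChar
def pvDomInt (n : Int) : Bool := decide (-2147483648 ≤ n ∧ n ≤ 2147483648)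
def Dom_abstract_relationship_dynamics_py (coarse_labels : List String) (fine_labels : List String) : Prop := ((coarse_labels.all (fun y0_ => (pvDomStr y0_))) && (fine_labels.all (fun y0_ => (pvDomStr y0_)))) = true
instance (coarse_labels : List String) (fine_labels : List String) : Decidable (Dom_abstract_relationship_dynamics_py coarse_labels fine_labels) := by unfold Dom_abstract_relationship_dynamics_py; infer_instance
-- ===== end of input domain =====

-- B replaces A's four separate membership scans and indicator-list comprehension by a single
-- pass maintaining (minimum trigger priority, keyword count) accumulators (objective: alternative).

-- ===== PORT A =====
-- the keyword list of A's comprehension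
def pvKeywordsA : List String := ["trust", "intimacy", "conflict", "support"]

def abstract_relationship_dynamics_py (coarse_labels : List String) (fine_labels : List String) : String :=
  let relationship_indicators :=
    coarse_labels.filter (fun label => pvKeywordsA.any (fun k => PySem.Str.isIn k label))
  if coarse_labels.contains "trust_building" then "trust_development_dynamic"
  else if coarse_labels.contains "conflict_resolution" then "conflict_resolution_dynamic"
  else if coarse_labels.contains "intimacy_deepening" then "intimacy_progression_dynamic"
  else if coarse_labels.contains "support_seeking" then "support_exchange_dynamic"
  else if relationship_indicators.length > 2 then "complex_relationship_dynamic"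
  else "neutral_relationship_dynamic"

-- ===== PORT B =====
def pvResults : List String :=
  ["trust_development_dynamic", "conflict_resolution_dynamic",
   "intimacy_progression_dynamic", "support_exchange_dynamic"]

-- _PRIORITY.get(label, 4)
def pvPriority (s : String) : Nat :=
  if s = "trust_building" then 0
  else if s = "conflict_resolution" then 1
  else if s = "intimacy_deepening" then 2
  else if s = "support_seeking" then 3
  else 4

def pvKeywordsB : List String := ["trust", "intimacy", "conflict", "support"]

-- the single for-loop over coarse_labels with accumulators (best, count)
def pvScan : List String → Nat × Nat → Nat × Nat
  | [], st => st
  | l :: rest, (best, count) =>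
      pvScan rest
        ((if pvPriority l < best then pvPriority l else best),
         (if pvKeywordsB.any (fun k => PySem.Str.isIn k l) then count + 1 else count))

def abstract_relationship_dynamics_py_alt (coarse_labels : List String) (fine_labels : List String) : String :=
  let st := pvScan coarse_labels (4, 0)
  if st.1 < 4 then pvResults.getD st.1 ""
  else if st.2 > 2 then "complex_relationship_dynamic"
  else "neutral_relationship_dynamic"

-- ===== PRECONDITION & SPEC =====
def Spec_abstract_relationship_dynamics_py (coarse_labels : List String) (fine_labels : List String) (out : String) : Prop := out = abstract_relationship_dynamics_py_alt coarse_labels fine_labels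
instance (coarse_labels : List String) (fine_labels : List String) (out : String) : Decidable (Spec_abstract_relationship_dynamics_py coarse_labels fine_labels out) := by unfold Spec_abstract_relationship_dynamics_py; infer_instance

-- ===== CLAIM =====
def Claim_equal_abstract_relationship_dynamics_py : Prop := ∀ (coarse_labels : List String) (fine_labels : List String), Dom_abstract_relationship_dynamics_py coarse_labels fine_labels → Spec_abstract_relationship_dynamics_py coarse_labels fine_labels (abstract_relationship_dynamics_py coarse_labels fine_labels)

-- ===== LEMMAS AND PROOFS =====

-- the scan equals (min of priorities with the initial best, count + number of indicator labels)
-- folding min over the list commutes with taking min at the seed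
theorem pvFoldr_min_seed (cs : List String) (a b : Nat) :
    cs.foldr (fun l x => min (pvPriority l) x) (min a b) =
      min a (cs.foldr (fun l x => min (pvPriority l) x) b) := by
  induction cs with
  | nil => simp
  | cons x xs ih => simp only [List.foldr_cons, ih]; omega

theorem pvScan_eq (cs : List String) (b c : Nat) :
    pvScan cs (b, c) =
      (cs.foldr (fun l a => min (pvPriority l) a) b,
       c + cs.countP (fun l => pvKeywordsB.any (fun k => PySem.Str.isIn k l))) := by
  induction cs generalizing b c with
  | nil => simp [pvScan]
  | cons l rest ih =>
      simp only [pvScan, ih, List.countP_cons, Prod.mk.injEq]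
      constructor
      · have h : (if pvPriority l < b then pvPriority l else b) = min (pvPriority l) b := by
          split <;> omega
        rw [h, pvFoldr_min_seed, List.foldr_cons]
      · split <;> omega

-- the folded minimum priority matches A's elif chain of membership tests
theorem pvMin_eq (cs : List String) :
    cs.foldr (fun l a => min (pvPriority l) a) 4 =
      (if cs.contains "trust_building" then 0
       else if cs.contains "conflict_resolution" then 1
       else if cs.contains "intimacy_deepening" then 2
       else if cs.contains "support_seeking" then 3
       else 4) := by
  induction cs with
  | nil => simp
  | cons l rest ih =>
      rw [List.foldr_cons, ih]
      simp only [List.contains_cons, pvPriority]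
      by_cases h0 : l = "trust_building" <;>
        by_cases h1 : l = "conflict_resolution" <;>
          by_cases h2 : l = "intimacy_deepening" <;>
            by_cases h3 : l = "support_seeking" <;>
              simp_all <;> split_ifs <;> simp_all

-- ===== VERDICT =====
theorem abstract_relationship_dynamics_py_spec : Claim_equal_abstract_relationship_dynamics_py := by
  intro cs fs _
  unfold Spec_abstract_relationship_dynamics_py abstract_relationship_dynamics_py
    abstract_relationship_dynamics_py_alt
  simp only [pvScan_eq, pvMin_eq, Nat.zero_add, List.countP_eq_length_filter, pvKeywordsA,
    pvKeywordsB, pvResults]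
  split_ifs <;> simp_all [List.getD]
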